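-- pv_equiv track=rewrite | github.com/brandon-fryslie/mcpi | src/mcpi/registry/doc_parser.py | _is_html
-- ===== SOURCE A (Python) =====
-- def _is_html(content: str) -> bool:
--     """Check if content is HTML.
--
--     Args:
--         content: Content to check
--
--     Returns:
--         True if content appears to be HTML
--     """
--     content_lower = content.lower().strip()
--     # Check for HTML doctype, html tags, or common HTML elements
--     html_indicators = [
--         '<!doctype html',
--         '<html',
--         '<head>',
--         '<body>',
--         '<div',
--         '<p>',
--         '<h1>',
--         '<script',
--         '<style'
--     ]
--     return any(indicator in content_lower for indicator in html_indicators)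
-- ===== SOURCE B (Python) =====
-- def _is_html(content: str) -> bool:
--     """Check if content is HTML (single left-to-right scan instead of one
--     substring search per indicator)."""
--     s = content.lower().strip()
--     indicators = (
--         '<!doctype html',
--         '<html',
--         '<head>',
--         '<body>',
--         '<div',
--         '<p>',
--         '<h1>',
--         '<script',
--         '<style',
--     )
--     # every indicator starts with '<': scan once, and only at a '<' compare
--     # the candidate indicators against that position
--     for j, c in enumerate(s):
--         if c == '<' and any(s.startswith(ind, j) for ind in indicators):
--             return True
--     return False
-- ===== Notes on version B (the rewrite author's own statement) =====
-- stated objective: alternative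
-- what changed: Instead of running one full substring search per indicator (k passes over the text), B makes a single left-to-right scan and, only at positions holding the tag-opening character, checks whether any indicator starts there.
import Mathlib
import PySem

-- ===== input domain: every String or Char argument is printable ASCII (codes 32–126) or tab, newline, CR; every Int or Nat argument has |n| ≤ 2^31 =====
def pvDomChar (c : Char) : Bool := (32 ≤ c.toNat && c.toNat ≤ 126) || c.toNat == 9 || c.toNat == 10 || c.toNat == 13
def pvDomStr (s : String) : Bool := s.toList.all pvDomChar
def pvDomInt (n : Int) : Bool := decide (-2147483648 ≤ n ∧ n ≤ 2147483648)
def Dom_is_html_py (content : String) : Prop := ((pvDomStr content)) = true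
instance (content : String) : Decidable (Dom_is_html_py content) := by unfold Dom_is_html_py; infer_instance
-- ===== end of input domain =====

-- B differs from A only in strategy: one left-to-right scan checking the indicators at each '<', instead of one substring search per indicator.

-- ===== PORT A =====
def is_html_py (content : String) : Bool :=
  let content_lower := PySem.Str.strip (PySem.Str.lower content)
  let html_indicators : List String :=
    ["<!doctype html", "<html", "<head>", "<body>", "<div", "<p>", "<h1>", "<script", "<style"]
  html_indicators.any (fun indicator => PySem.Str.isIn indicator content_lower)

-- ===== PORT B =====
def pvIndicatorsB : List (List Char) :=
  ["<!doctype html".toList, "<html".toList, "<head>".toList, "<body>".toList,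
   "<div".toList, "<p>".toList, "<h1>".toList, "<script".toList, "<style".toList]

-- the scan loop of Source B: at each position, if the char is '<', try the indicators as prefixes
def pvScanB (inds : List (List Char)) : List Char → Bool
  | [] => false
  | c :: rest => (c == '<' && inds.any (fun i => i.isPrefixOf (c :: rest))) || pvScanB inds rest

def is_html_py_alt (content : String) : Bool :=
  pvScanB pvIndicatorsB (PySem.Chars.strip (PySem.Chars.lower content.toList))

-- ===== PRECONDITION & SPEC =====
def Spec_is_html_py (content : String) (out : Bool) : Prop := out = is_html_py_alt content
instance (content : String) (out : Bool) : Decidable (Spec_is_html_py content out) := by unfold Spec_is_html_py; infer_instance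

-- ===== CLAIM (what is proved, stated in full; the proofs are below) =====
def Claim_equal_is_html_py : Prop := ∀ (content : String), Dom_is_html_py content → Spec_is_html_py content (is_html_py content)

-- ===== LEMMAS AND PROOFS =====

-- the scan finds a match iff some indicator is a prefix of some suffix (indicators all start with '<')
lemma pvScanB_true_iff (inds : List (List Char)) (h : ∀ i ∈ inds, i.head? = some '<') :
    ∀ cs : List Char, pvScanB inds cs = true ↔ ∃ i ∈ inds, ∃ j, i <+: cs.drop j := by
  intro cs
  induction cs with
  | nil =>
    simp only [pvScanB, List.drop_nil]
    constructor
    · intro hfalse; exact absurd hfalse (by simp)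
    · rintro ⟨i, hi, j, hpre⟩
      have := h i hi
      cases i with
      | nil => simp at this
      | cons a t => exact absurd (List.prefix_nil.mp hpre) (by simp)
  | cons c rest ih =>
    simp only [pvScanB, Bool.or_eq_true, Bool.and_eq_true, List.any_eq_true, ih]
    constructor
    · rintro (⟨-, i, hi, hpre⟩ | ⟨i, hi, j, hpre⟩)
      · exact ⟨i, hi, 0, by simpa using List.isPrefixOf_iff_prefix.mp hpre⟩
      · exact ⟨i, hi, j + 1, by simpa using hpre⟩
    · rintro ⟨i, hi, j, hpre⟩
      cases j with
      | zero =>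
        left
        have hpre' := hpre
        simp only [List.drop_zero] at hpre'
        have hhead : i.head? = some '<' := h i hi
        cases i with
        | nil => simp at hhead
        | cons a t =>
          have ha : a = '<' := by simpa using hhead
          have hc : c = a := by
            rcases hpre' with ⟨u, hu⟩
            cases hu; rfl
          refine ⟨by simp [hc, ha], ⟨a :: t, hi, List.isPrefixOf_iff_prefix.mpr hpre'⟩⟩
      | succ j' =>
        right
        exact ⟨i, hi, j', by simpa using hpre⟩

lemma pv_lower_strip (content : String) :
    (PySem.Str.strip (PySem.Str.lower content)).toList
      = PySem.Chars.strip (PySem.Chars.lower content.toList) := by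
  simp [PySem.Str.toList_strip, PySem.Str.toList_lower]

-- ===== VERDICT (by name: the statement is the Claim_ definition above) =====
theorem is_html_py_spec : Claim_equal_is_html_py := by
  intro content _
  show is_html_py content = is_html_py_alt content
  have hheads : ∀ i ∈ pvIndicatorsB, i.head? = some '<' := by decide
  have hscan := pvScanB_true_iff pvIndicatorsB hheads
      (PySem.Chars.strip (PySem.Chars.lower content.toList))
  rw [Bool.eq_iff_iff]
  unfold is_html_py is_html_py_alt
  rw [hscan]
  simp only [List.any_eq_true, PySem.Str.isIn_iff_infix]
  rw [pv_lower_strip]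
  constructor
  · rintro ⟨ind, hind, hinf⟩
    have hj : ∃ j, ind.toList <+: (PySem.Chars.strip (PySem.Chars.lower content.toList)).drop j := by
      rcases hinf with ⟨u, v, huv⟩
      exact ⟨u.length, by rw [← huv]; simp⟩
    rcases hj with ⟨j, hj⟩
    refine ⟨ind.toList, ?_, j, hj⟩
    fin_cases hind <;> simp [pvIndicatorsB]
  · rintro ⟨i, hi, j, hpre⟩
    have hmem : ∃ ind ∈ ["<!doctype html", "<html", "<head>", "<body>", "<div", "<p>", "<h1>", "<script", "<style"], ind.toList = i := by
      fin_cases hi <;> exact ⟨_, by simp, rfl⟩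
    rcases hmem with ⟨ind, hind, rfl⟩
    exact ⟨ind, hind, hpre.isInfix.trans (List.drop_suffix j _).isInfix⟩
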